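-- pv_equiv track=rewrite | github.com/xuwd11/Coursera-Bioinformatics | 13_MedianString.py | PatternStringDistance
-- ===== SOURCE A (Python) =====
-- def HammingDistance(seq1, seq2):
--     return len([i for i in range(len(seq1)) if seq1[i] != seq2[i]])
--
-- def PatternStringDistance(pattern, dna):
--     k = len(pattern)
--     distance = 0
--     for seq in dna:
--         l = len(seq)
--         hd = float('inf')
--         for i in range(l - k +1):
--             hdCurr = HammingDistance(pattern, seq[i:i+k])
--             if hd > hdCurr:
--                 hd = hdCurr
--         distance += hd
--     return distance
-- ===== SOURCE B (Python) =====
-- def PatternStringDistance(pattern, dna):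
--     # Cross-correlation by character index: build pattern-position index once,
--     # scatter match counts per window offset, min Hamming = k - max matches.
--     k = len(pattern)
--     pos = {}
--     for j, c in enumerate(pattern):
--         pos.setdefault(c, []).append(j)
--     total = 0
--     for seq in dna:
--         n = len(seq) - k + 1
--         matches = [0] * n
--         for p, c in enumerate(seq):
--             for j in pos.get(c, ()):
--                 i = p - j
--                 if 0 <= i < n:
--                     matches[i] += 1
--         total += k - max(matches)
--     return total
-- ===== Notes on version B (the rewrite author's own statement) =====
-- stated objective: alternative
-- what changed: Replaces A's window-by-window Hamming scan (slice + HammingDistance per offset, running min) by a cross-correlation: a char->positions index of the pattern is built once, one pass over each sequence scatters match counts into a per-offset table, and the answer is k - max(matches), so only matching character pairs cost inner-loop work.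
-- outside the precondition, e.g. on PatternStringDistance('AC', ['A']): A returns inf, B raises ValueError
import Mathlib
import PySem

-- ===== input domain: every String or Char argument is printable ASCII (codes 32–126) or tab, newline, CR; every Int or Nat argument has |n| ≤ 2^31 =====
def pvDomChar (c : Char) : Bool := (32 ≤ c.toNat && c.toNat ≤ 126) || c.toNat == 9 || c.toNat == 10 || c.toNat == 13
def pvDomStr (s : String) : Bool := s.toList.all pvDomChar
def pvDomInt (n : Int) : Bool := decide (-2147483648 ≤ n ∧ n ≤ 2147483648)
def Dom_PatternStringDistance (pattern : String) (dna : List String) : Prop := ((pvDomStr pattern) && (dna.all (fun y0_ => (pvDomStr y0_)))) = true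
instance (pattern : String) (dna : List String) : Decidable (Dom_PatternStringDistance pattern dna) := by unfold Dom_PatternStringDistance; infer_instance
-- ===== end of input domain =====

-- B solves the task by cross-correlation instead of a window-by-window Hamming scan:
-- a char->positions index of the pattern, one scatter pass per sequence into a
-- per-offset match-count table, answer = k - max(matches).
-- ===== PORT A =====
-- HammingDistance(seq1, seq2): count of i in range(len(seq1)) with seq1[i] != seq2[i].
-- In A it is only called with len(seq2) = len(seq1), where pyGet? is always some.
def pyHammingDistance (seq1 seq2 : List Char) : Int :=
  ((PySem.List.pyRange 0 (seq1.length : Int) 1).filter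
    (fun i => PySem.List.pyGet? seq1 i ≠ PySem.List.pyGet? seq2 i)).length

def PatternStringDistance (pattern : String) (dna : List String) : Int :=
  let k : Int := PySem.Str.len pattern
  dna.foldl (fun distance seq =>
    let l : Int := PySem.Str.len seq
    -- hd = float('inf') is modelled as `none`; Python's `hd > hdCurr` is true whenever hd is inf
    let hd : Option Int := (PySem.List.pyRange 0 (l - k + 1) 1).foldl
      (fun hd i =>
        let hdCurr := pyHammingDistance pattern.toList
          (PySem.List.slice seq.toList (some i) (some (i + k)))
        match hd with
        | none => some hdCurr
        | some h => if h > hdCurr then some hdCurr else some h)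
      none
    -- inside Pre_ the range is nonempty, so hd is some value here
    distance + hd.getD 0) 0

-- ===== PORT B =====
-- pos.setdefault(c, []).append(j): append j to the (possibly fresh) list at key c,
-- keeping the key's dict position = PySem.Dict.modify c [] (· ++ [j])
def pvPosIdx (pat : List Char) : PySem.Dict Char (List Int) :=
  (PySem.List.enumerate pat).foldl
    (fun d jc => d.modify jc.2 [] (fun l => l ++ [jc.1])) PySem.Dict.empty

-- inner loop: for j in pos.get(c, ()): i = p - j; if 0 <= i < n: matches[i] += 1
def pvScatter (n p : Int) (m : List Int) (js : List Int) : List Int :=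
  js.foldl (fun m j =>
    let i := p - j
    if 0 ≤ i ∧ i < n then m.set i.toNat (m.getD i.toNat 0 + 1) else m) m

def PatternStringDistance_alt (pattern : String) (dna : List String) : Int :=
  let k : Int := PySem.Str.len pattern
  let pos := pvPosIdx pattern.toList
  dna.foldl (fun total seq =>
    let n : Int := PySem.Str.len seq - k + 1
    -- [0]*n (empty when n <= 0); max([]) raises in Python (outside Pre_), getD 0 is a placeholder there
    let init : List Int := List.replicate n.toNat 0
    let mtab := (PySem.List.enumerate seq.toList).foldl
      (fun m pc => pvScatter n pc.1 m (pos.getD pc.2 [])) init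
    total + (k - (PySem.List.max? mtab (fun y => y)).getD 0)) 0

-- ===== PRECONDITION & SPEC =====
-- Pre_ excludes dna lists containing a string shorter than pattern: there A's running
-- minimum stays float('inf') and A returns a float, not a value of the declared Int type
-- (B's max([]) raises ValueError there).
def Pre_PatternStringDistance (pattern : String) (dna : List String) : Prop :=
  ∀ s ∈ dna, pattern.toList.length ≤ s.toList.length
instance (pattern : String) (dna : List String) : Decidable (Pre_PatternStringDistance pattern dna) := by unfold Pre_PatternStringDistance; infer_instance

def pvWitness_PatternStringDistance : String × List String := ("AC", ["GACT", "ACCA"])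

def Spec_PatternStringDistance (pattern : String) (dna : List String) (out : Int) : Prop := out = PatternStringDistance_alt pattern dna
instance (pattern : String) (dna : List String) (out : Int) : Decidable (Spec_PatternStringDistance pattern dna out) := by unfold Spec_PatternStringDistance; infer_instance

-- ===== CLAIM (what is proved, stated in full; the proofs are below) =====
def Claim_equal_PatternStringDistance : Prop := ∀ (pattern : String) (dna : List String), Dom_PatternStringDistance pattern dna → Pre_PatternStringDistance pattern dna → Spec_PatternStringDistance pattern dna (PatternStringDistance pattern dna)

-- ===== LEMMAS AND PROOFS =====

-- number of positions j where the window of s at offset i matches pattern, counting only j with i + j < P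
def pvCntUpTo (pat s : List Char) (P i : Nat) : Nat :=
  (List.range pat.length).countP (fun j => decide (i + j < P) && (pat[j]? == s[i + j]?))

-- full match count of the window at offset i
def pvCnt (pat s : List Char) (i : Nat) : Nat :=
  (List.range pat.length).countP (fun j => pat[j]? == s[i + j]?)

-- the body of A's running-minimum update, named for the proofs below
def optStep (hd : Option Int) (x : Int) : Option Int :=
  match hd with
  | none => some x
  | some h => if h > x then some x else some h

-- A's running minimum over a list is Python's min (= PySem.List.min?) of that list
lemma foldl_optStep_eq_min? (xs : List Int) :
    List.foldl optStep none xs = PySem.List.min? xs (fun y => y) := by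
  unfold PySem.List.min?
  apply PySem.List.foldl_congr_mem
  intro acc x _
  cases acc <;> simp [optStep, GT.gt]

-- the pattern index sends c to the increasing list of positions of c in pat
lemma posIdx_getD (pat : List Char) (c : Char) :
    (pvPosIdx pat).getD c [] =
      ((List.range pat.length).filter (fun j => pat[j]? == some c)).map (fun (j : Nat) => (j : Int)) := by
  induction pat using List.reverseRecOn with
  | nil => rfl
  | append_singleton l x ih =>
    unfold pvPosIdx at ih ⊢
    rw [PySem.List.enumerate_append, List.foldl_append]
    simp only [PySem.List.enumerate_cons, PySem.List.enumerate_nil, List.foldl_cons, List.foldl_nil]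
    have hrange : List.range (l ++ [x]).length = List.range l.length ++ [l.length] := by
      rw [List.length_append, List.length_singleton, List.range_succ]
    rw [hrange, List.filter_append]
    have hfl : (List.range l.length).filter (fun j => (l ++ [x])[j]? == some c)
        = (List.range l.length).filter (fun j => l[j]? == some c) := by
      apply List.filter_congr
      intro j hj
      rw [List.getElem?_append_left (List.mem_range.mp hj)]
    rw [hfl]
    by_cases hc : x = c
    · subst hc
      rw [PySem.Dict.getD_modify_self, ih]
      simp
    · rw [PySem.Dict.getD_modify_of_ne _ _ _ (fun h => hc h.symm), ih]
      have hsing : List.filter (fun j => (l ++ [x])[j]? == some c) [l.length] = [] := by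
        simp [hc]
      rw [hsing, List.append_nil]

-- scatter adds 1 exactly at the offsets i with p - i in js (js duplicate-free)
lemma scatter_getElem (p : Int) (js : List Int) (hnd : js.Nodup) (m : List Int) (i : Nat)
    (hi : i < m.length) :
    (pvScatter (m.length : Int) p m js)[i]? = some (m[i] + if (p - (i : Int)) ∈ js then 1 else 0) := by
  induction js generalizing m with
  | nil => simp [pvScatter]
  | cons j t ih =>
    obtain ⟨hj, hnd'⟩ := List.nodup_cons.mp hnd
    unfold pvScatter
    simp only [List.foldl_cons]
    rw [show ∀ m' : List Int, List.foldl
      (fun (m_1 : List Int) (j : Int) =>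
        if 0 ≤ p - j ∧ p - j < (m.length : Int) then m_1.set (p - j).toNat (m_1.getD (p - j).toNat 0 + 1) else m_1) m' t
      = pvScatter ((m.length : Int)) p m' t from fun _ => rfl]
    by_cases hg : 0 ≤ p - j ∧ p - j < (m.length : Int)
    · simp only [if_pos hg]
      set m' := m.set (p - j).toNat (m.getD (p - j).toNat 0 + 1) with hm'
      have hlen : m'.length = m.length := List.length_set
      have hi' : i < m'.length := by rw [hlen]; exact hi
      have hrec := ih hnd' m' hi'
      rw [hlen] at hrec
      rw [hrec]
      by_cases hij : p - (i : Int) = j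
      · have hpj : p - j = (i : Int) := by omega
        have hidx : (p - j).toNat = i := by rw [hpj]; exact Int.toNat_natCast i
        have hm'i : m'[i] = m[i] + 1 := by
          have : m'[i]? = some (m[i] + 1) := by
            rw [hm', List.getElem?_set, if_pos hidx, if_pos (hidx ▸ hi),
              hidx, List.getD_eq_getElem m 0 hi]
          simpa [List.getElem?_eq_getElem hi'] using this
        have hnt : p - (i : Int) ∉ t := hij ▸ hj
        simp [hm'i, hij, hj]
      · have hidx : (p - j).toNat ≠ i := by
          intro h
          apply hij
          omega
        have hm'i : m'[i] = m[i] := by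
          have : m'[i]? = m[i]? := by rw [hm', List.getElem?_set, if_neg hidx]
          simpa [List.getElem?_eq_getElem hi, List.getElem?_eq_getElem hi'] using this
        have hmem : (p - (i : Int)) ∈ j :: t ↔ (p - (i : Int)) ∈ t := by
          simp [List.mem_cons, hij]
        rw [hm'i, if_congr hmem rfl rfl]
    · simp only [if_neg hg]
      rw [ih hnd' m hi]
      have hij : p - (i : Int) ≠ j := by
        intro h
        apply hg
        constructor <;> omega
      have hmem : (p - (i : Int)) ∈ j :: t ↔ (p - (i : Int)) ∈ t := by
        simp [List.mem_cons, hij]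
      rw [if_congr hmem rfl rfl]

lemma scatter_length (n p : Int) (m js : List Int) : (pvScatter n p m js).length = m.length := by
  induction js generalizing m with
  | nil => rfl
  | cons j t ih =>
    unfold pvScatter
    simp only [List.foldl_cons]
    rw [show ∀ m', List.foldl _ m' t = pvScatter n p m' t from fun _ => rfl]
    split
    · rw [ih, List.length_set]
    · rw [ih]

-- a countP splits along a disjoint disjunction of its predicate
lemma countP_disj {α : Type} (l : List α) (p q r : α → Bool)
    (h : ∀ a ∈ l, p a = (q a || r a) ∧ ¬(q a = true ∧ r a = true)) :
    l.countP p = l.countP q + l.countP r := by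
  induction l with
  | nil => rfl
  | cons a t ih =>
    obtain ⟨hp, hd⟩ := h a (List.mem_cons_self)
    rw [List.countP_cons, List.countP_cons, List.countP_cons,
      ih (fun b hb => h b (List.mem_cons_of_mem a hb)), hp]
    cases hq : q a <;> cases hr : r a <;> simp_all <;> omega

-- counting j = a && e j over range k is an indicator
lemma countP_range_single (k a : Nat) (e : Nat → Bool) :
    (List.range k).countP (fun j => decide (j = a) && e j) = if a < k ∧ e a = true then 1 else 0 := by
  induction k with
  | zero => simp
  | succ k ih =>
    rw [List.range_succ, List.countP_append, ih]
    by_cases hak : a = k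
    · subst hak
      cases he : e a <;> simp [he]
    · have h0 : List.countP (fun j => decide (j = a) && e j) [k] = 0 := by
        simp [Ne.symm hak]
      have hiff : (a < k ∧ e a = true) ↔ (a < k + 1 ∧ e a = true) := by
        constructor <;> rintro ⟨h1, h2⟩ <;> exact ⟨by omega, h2⟩
      rw [h0, if_congr hiff rfl rfl, Nat.add_zero]

-- one scatter step advances the partial match count by the indicator of a hit at position P
lemma cntUpTo_succ (pat s : List Char) (P i : Nat) (hP : P < s.length) :
    pvCntUpTo pat s (P + 1) i = pvCntUpTo pat s P i +
      (if i ≤ P ∧ P - i < pat.length ∧ (pat[P - i]? == some s[P]) = true then 1 else 0) := by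
  unfold pvCntUpTo
  rw [countP_disj (List.range pat.length)
    (fun j => decide (i + j < P + 1) && (pat[j]? == s[i + j]?))
    (fun j => decide (i + j < P) && (pat[j]? == s[i + j]?))
    (fun j => decide (i + j = P) && (pat[j]? == s[i + j]?))
    (by
      intro j _
      constructor
      · cases hm : (pat[j]? == s[i + j]?)
        · simp [hm]
        · simp only [hm, Bool.and_true, ← Bool.decide_or]
          exact decide_eq_decide.mpr (by omega)
      · rintro ⟨h1, h2⟩
        simp only [Bool.and_eq_true, decide_eq_true_eq] at h1 h2
        omega)]
  congr 1
  by_cases hiP : i ≤ P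
  · have hcong : (List.range pat.length).countP (fun j => decide (i + j = P) && (pat[j]? == s[i + j]?))
        = (List.range pat.length).countP (fun j => decide (j = P - i) && (pat[j]? == s[i + j]?)) := by
      apply List.countP_congr
      intro j _
      have h1 : decide (i + j = P) = decide (j = P - i) := decide_eq_decide.mpr (by omega)
      rw [h1]
    rw [hcong, countP_range_single]
    have hPi : i + (P - i) = P := by omega
    rw [hPi, List.getElem?_eq_getElem hP]
    simp [hiP]
  · have hz : (List.range pat.length).countP (fun j => decide (i + j = P) && (pat[j]? == s[i + j]?)) = 0 := by
      rw [List.countP_eq_zero]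
      intro j _
      simp only [Bool.and_eq_true, decide_eq_true_eq]
      rintro ⟨h1, _⟩
      omega
    rw [hz, if_neg (by omega)]

-- the full scatter pass, by downward induction on the unprocessed suffix
lemma fold_scatter_aux (pat s : List Char) (hk : pat.length ≤ s.length) (d : Nat) :
    ∀ (P : Nat) (m : List Int), P + d = s.length →
    m.length = s.length - pat.length + 1 →
    (∀ i (hi : i < m.length), m[i] = ((pvCntUpTo pat s P i : Nat) : Int)) →
    ∀ i, i < s.length - pat.length + 1 →
    ((PySem.List.enumerate (s.drop P) (P : Int)).foldl
        (fun m pc => pvScatter ((s.length : Int) - (pat.length : Int) + 1) pc.1 m ((pvPosIdx pat).getD pc.2 []))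
        m)[i]? = some ((pvCnt pat s i : Nat) : Int) := by
  induction d with
  | zero =>
    intro P m hPd hmlen hmval i hi
    have hP : P = s.length := by omega
    subst hP
    rw [List.drop_length, PySem.List.enumerate_nil, List.foldl_nil]
    have hi' : i < m.length := by omega
    rw [List.getElem?_eq_getElem hi', hmval i hi']
    have hcnt : pvCntUpTo pat s s.length i = pvCnt pat s i := by
      unfold pvCntUpTo pvCnt
      apply List.countP_congr
      intro j hj
      have hj' : j < pat.length := List.mem_range.mp hj
      have hlt : i + j < s.length := by omega
      simp [hlt]
    rw [hcnt]
  | succ d ih =>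
    intro P m hPd hmlen hmval i hi
    have hP : P < s.length := by omega
    have hdrop : s.drop P = s[P] :: s.drop (P + 1) := List.drop_eq_getElem_cons hP
    rw [hdrop, PySem.List.enumerate_cons, List.foldl_cons]
    have hncast : ((s.length : Int) - (pat.length : Int) + 1) = ((m.length : Int)) := by omega
    have hjsnd : ((pvPosIdx pat).getD (s[P]) []).Nodup := by
      rw [posIdx_getD]
      exact ((List.nodup_range).filter _).map (fun a b h => by exact_mod_cast h)
    have hlen' : (pvScatter ((s.length : Int) - (pat.length : Int) + 1) (P : Int) m
        ((pvPosIdx pat).getD (s[P]) [])).length = m.length := scatter_length _ _ _ _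
    have hval' : ∀ i (hi : i < (pvScatter ((s.length : Int) - (pat.length : Int) + 1) (P : Int) m
        ((pvPosIdx pat).getD (s[P]) [])).length),
        (pvScatter ((s.length : Int) - (pat.length : Int) + 1) (P : Int) m
          ((pvPosIdx pat).getD (s[P]) []))[i] = ((pvCntUpTo pat s (P + 1) i : Nat) : Int) := by
      intro i hi'
      have hi'' : i < m.length := by omega
      have hsc := scatter_getElem (P : Int) ((pvPosIdx pat).getD (s[P]) []) hjsnd m i hi''
      rw [← hncast] at hsc
      have hmem : ((P : Int) - (i : Int)) ∈ (pvPosIdx pat).getD (s[P]) [] ↔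
          (i ≤ P ∧ P - i < pat.length ∧ (pat[P - i]? == some s[P]) = true) := by
        rw [posIdx_getD]
        constructor
        · intro h
          obtain ⟨j, hjf, hjc⟩ := List.mem_map.mp h
          obtain ⟨hjr, hje⟩ := List.mem_filter.mp hjf
          have hjk : j < pat.length := List.mem_range.mp hjr
          have hji : j = P - i ∧ i ≤ P := by omega
          refine ⟨hji.2, by omega, ?_⟩
          rw [← hji.1]; exact hje
        · rintro ⟨h1, h2, h3⟩
          apply List.mem_map.mpr
          refine ⟨P - i, List.mem_filter.mpr ⟨List.mem_range.mpr h2, h3⟩, by omega⟩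
      have hset : (pvScatter ((s.length : Int) - (pat.length : Int) + 1) (P : Int) m
          ((pvPosIdx pat).getD (s[P]) []))[i]?
          = some (m[i] + if (i ≤ P ∧ P - i < pat.length ∧ (pat[P - i]? == some s[P]) = true) then 1 else 0) := by
        rw [hsc, if_congr hmem rfl rfl]
      rw [List.getElem?_eq_getElem hi'] at hset
      rw [Option.some_inj.mp hset, hmval i hi'', cntUpTo_succ pat s P i hP]
      push_cast
      split_ifs <;> simp
    exact ih (P + 1) _ (by omega) (by omega) hval' i hi

-- after the scatter pass, matches[i] is the full match count of window i
lemma fold_scatter (pat s : List Char) (hk : pat.length ≤ s.length) (i : Nat)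
    (hi : i < s.length - pat.length + 1) :
    ((PySem.List.enumerate s).foldl
        (fun m pc => pvScatter ((s.length : Int) - (pat.length : Int) + 1) pc.1 m ((pvPosIdx pat).getD pc.2 []))
        (List.replicate (s.length - pat.length + 1) (0 : Int)))[i]? = some ((pvCnt pat s i : Nat) : Int) := by
  have h := fold_scatter_aux pat s hk s.length 0 (List.replicate (s.length - pat.length + 1) (0 : Int))
    (by omega) (by simp)
    (by
      intro i hi
      rw [List.getElem_replicate]
      unfold pvCntUpTo
      rw [List.countP_eq_zero.mpr (by intro j _; simp)]
      simp)
    i hi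
  simpa using h


-- A's window Hamming distance is k - (match count)
lemma ham_eq (pat s : List Char) (i : Nat) :
    pyHammingDistance pat (PySem.List.slice s (some (i : Int)) (some ((i : Int) + (pat.length : Int))))
      = (pat.length : Int) - (pvCnt pat s i : Int) := by
  unfold pyHammingDistance pvCnt
  have hcast : ((i : Int) + (pat.length : Int)) = ((i + pat.length : Nat) : Int) := by push_cast; ring
  rw [hcast, PySem.List.slice_natCast]
  have hd : i + pat.length - i = pat.length := by omega
  rw [hd, PySem.List.pyRange_zero_natCast, List.filter_map, List.length_map,
    ← List.countP_eq_length_filter]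
  have hwin : ∀ j : Nat, j < pat.length →
      (List.take pat.length (List.drop i s))[j]? = s[i + j]? := by
    intro j hj
    rw [List.getElem?_take, if_pos hj, List.getElem?_drop]
  have hcong : (List.range pat.length).countP
        ((fun x => decide (PySem.List.pyGet? pat x ≠ PySem.List.pyGet? (List.take pat.length (List.drop i s)) x)) ∘ (fun k : Nat => (k : Int)))
      = (List.range pat.length).countP (fun j => !(pat[j]? == s[i + j]?)) := by
    apply List.countP_congr
    intro j hj
    have hj' : j < pat.length := List.mem_range.mp hj
    simp [PySem.List.pyGet?_natCast, hwin j hj']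
  rw [hcong]
  have hsplit := List.length_eq_countP_add_countP (fun j => pat[j]? == s[i + j]?) (l := List.range pat.length)
  have hneg : (List.range pat.length).countP (fun a => decide ¬((fun j => pat[j]? == s[i + j]?) a) = true)
      = (List.range pat.length).countP (fun j => !(pat[j]? == s[i + j]?)) := by
    apply List.countP_congr; intro j _; simp
  rw [hneg, List.length_range] at hsplit
  omega

-- min over (k - x) is k - max over x
-- running min of (k - x) is k minus the running max of x
lemma foldl_min_map_sub (k x : Int) (t : List Int) :
    (t.map (fun y => k - y)).foldl min (k - x) = k - t.foldl max x := by
  induction t generalizing x with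
  | nil => rfl
  | cons a t ih => simp only [List.map_cons, List.foldl_cons, ← ih]; congr 1; omega

lemma min?_sub (k : Int) (xs : List Int) :
    PySem.List.min? (xs.map (fun x => k - x)) (fun y => y)
      = (PySem.List.max? xs (fun y => y)).map (fun x => k - x) := by
  cases xs with
  | nil => rfl
  | cons x t =>
    rw [List.map_cons, PySem.List.min?_id_cons, PySem.List.max?_id_cons, Option.map_some]
    exact congrArg some (foldl_min_map_sub k x t)

-- foldl of scatter steps preserves the table length
lemma fold_scatter_len (d : PySem.Dict Char (List Int)) (n : Int) (l : List (Int × Char)) :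
    ∀ m : List Int, (l.foldl (fun m pc => pvScatter n pc.1 m (d.getD pc.2 [])) m).length = m.length := by
  induction l with
  | nil => intro m; rfl
  | cons pc t ih => intro m; rw [List.foldl_cons, ih, scatter_length]

-- per-sequence agreement
lemma per_seq (pattern : String) (s : List Char) (hks : pattern.toList.length ≤ s.length) :
    (Option.getD ((PySem.List.pyRange 0 ((s.length : Int) - (pattern.toList.length : Int) + 1) 1).foldl
      (fun hd i =>
        let hdCurr := pyHammingDistance pattern.toList
          (PySem.List.slice s (some i) (some (i + (pattern.toList.length : Int))))
        match hd with
        | none => some hdCurr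
        | some h => if h > hdCurr then some hdCurr else some h)
      none) 0)
    = (pattern.toList.length : Int) -
      (Option.getD (PySem.List.max?
        ((PySem.List.enumerate s).foldl
          (fun m pc => pvScatter ((s.length : Int) - (pattern.toList.length : Int) + 1) pc.1 m ((pvPosIdx pattern.toList).getD pc.2 []))
          (List.replicate ((s.length : Int) - (pattern.toList.length : Int) + 1).toNat (0 : Int)))
        (fun y => y)) 0) := by
  set pat := pattern.toList with hpat
  set N := s.length - pat.length + 1 with hN
  have hNcast : (s.length : Int) - (pat.length : Int) + 1 = (N : Int) := by omega
  have hNpos : 0 < N := by omega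
  -- B side: the scatter table is the list of window match counts
  have hrep : ((s.length : Int) - (pat.length : Int) + 1).toNat = N := by omega
  rw [hrep]
  have hmtab : ((PySem.List.enumerate s).foldl
      (fun m pc => pvScatter ((s.length : Int) - (pat.length : Int) + 1) pc.1 m ((pvPosIdx pat).getD pc.2 []))
      (List.replicate N (0 : Int)))
      = (List.range N).map (fun i => ((pvCnt pat s i : Nat) : Int)) := by
    apply List.ext_getElem?
    intro i
    by_cases hi : i < N
    · rw [fold_scatter pat s hks i (by omega), List.getElem?_map, List.getElem?_range hi]
      rfl
    · have h1 : ((PySem.List.enumerate s).foldl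
          (fun m pc => pvScatter ((s.length : Int) - (pat.length : Int) + 1) pc.1 m ((pvPosIdx pat).getD pc.2 []))
          (List.replicate N (0 : Int))).length = N := by
        rw [fold_scatter_len, List.length_replicate]
      rw [List.getElem?_eq_none (by rw [h1]; omega),
        List.getElem?_eq_none (by rw [List.length_map, List.length_range]; omega)]
  rw [hmtab]
  -- A side: the running minimum is min over the window Hamming distances
  rw [hNcast, PySem.List.pyRange_zero_natCast, List.foldl_map]
  have hbody : (fun (hd : Option Int) (j : Nat) =>
      (fun hd (i : Int) =>
        let hdCurr := pyHammingDistance pat (PySem.List.slice s (some i) (some (i + (pat.length : Int))))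
        match hd with
        | none => some hdCurr
        | some h => if h > hdCurr then some hdCurr else some h) hd ((j : Nat) : Int))
      = (fun hd j => optStep hd
          (pyHammingDistance pat (PySem.List.slice s (some ((j : Nat) : Int)) (some (((j : Nat) : Int) + (pat.length : Int)))))) := rfl
  rw [hbody, ← List.foldl_map, foldl_optStep_eq_min?]
  have hham : (List.range N).map
      (fun j : Nat => pyHammingDistance pat (PySem.List.slice s (some ((j : Nat) : Int)) (some (((j : Nat) : Int) + (pat.length : Int)))))
      = ((List.range N).map (fun i => ((pvCnt pat s i : Nat) : Int))).map (fun x => (pat.length : Int) - x) := by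
    rw [List.map_map]
    apply List.map_congr_left
    intro j _
    exact ham_eq pat s j
  rw [hham, min?_sub]
  cases hmax : PySem.List.max? ((List.range N).map (fun i => ((pvCnt pat s i : Nat) : Int))) (fun y => y) with
  | none =>
    have := (PySem.List.max?_eq_none_iff _ _).mp hmax
    simp only [List.map_eq_nil_iff, List.range_eq_nil] at this
    omega
  | some v => rfl

-- ===== VERDICT (by name: the statement is the Claim_ definition above) =====
theorem PatternStringDistance_spec : Claim_equal_PatternStringDistance := by
  intro pattern dna _ hpre
  unfold Spec_PatternStringDistance PatternStringDistance PatternStringDistance_alt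
  simp only [PySem.Str.len]
  apply PySem.List.foldl_congr_mem
  intro acc seq hseq
  exact congrArg (acc + ·) (per_seq pattern seq.toList (hpre seq hseq))
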